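-- pv_equiv track=rewrite | github.com/amitsajwan/MCP_API | core/intelligent_api_analyzer.py | _determine_cache_strategy_for_use_case
-- ===== SOURCE A (Python) =====
-- from typing import Dict, List, Any, Optional, Tuple
--
-- def _determine_cache_strategy_for_use_case(tools: List[Dict], tool_metadata: Dict) -> str:
--     """Determine overall cache strategy for use case"""
--
--     cache_strategies = []
--     for tool in tools:
--         metadata = tool_metadata.get(tool["name"], {})
--         strategy = metadata.get("cache_strategy", "no_cache")
--         cache_strategies.append(strategy)
--
--     if "cache_full_response" in cache_strategies:
--         return "aggressive_caching"
--     elif "cache_by_parameter" in cache_strategies: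
--         return "selective_caching"
--     elif "no_cache" in cache_strategies:
--         return "minimal_caching"
--     else:
--         return "standard_caching"
-- ===== SOURCE B (Python) =====
-- def _determine_cache_strategy_for_use_case(tools, tool_metadata):
--     """Back-to-front scan: fold each tool's strategy into a running verdict via a
--     priority-combine step, short-circuiting upgrades; no strategies list is built."""
--     verdict = "standard_caching"
--     for tool in reversed(tools):
--         s = tool_metadata.get(tool["name"], {}).get("cache_strategy", "no_cache")
--         if s == "cache_full_response":
--             verdict = "aggressive_caching"
--         elif verdict != "aggressive_caching":
--             if s == "cache_by_parameter":
--                 verdict = "selective_caching"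
--             elif verdict != "selective_caching" and s == "no_cache":
--                 verdict = "minimal_caching"
--     return verdict
-- ===== Notes on version B (the rewrite author's own statement) =====
-- stated objective: alternative
-- what changed: Instead of materialising the strategies list and rescanning it with three membership tests, B walks the tools back-to-front folding each tool's strategy into a running verdict with a priority-combine step that only ever upgrades the verdict.
import Mathlib
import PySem

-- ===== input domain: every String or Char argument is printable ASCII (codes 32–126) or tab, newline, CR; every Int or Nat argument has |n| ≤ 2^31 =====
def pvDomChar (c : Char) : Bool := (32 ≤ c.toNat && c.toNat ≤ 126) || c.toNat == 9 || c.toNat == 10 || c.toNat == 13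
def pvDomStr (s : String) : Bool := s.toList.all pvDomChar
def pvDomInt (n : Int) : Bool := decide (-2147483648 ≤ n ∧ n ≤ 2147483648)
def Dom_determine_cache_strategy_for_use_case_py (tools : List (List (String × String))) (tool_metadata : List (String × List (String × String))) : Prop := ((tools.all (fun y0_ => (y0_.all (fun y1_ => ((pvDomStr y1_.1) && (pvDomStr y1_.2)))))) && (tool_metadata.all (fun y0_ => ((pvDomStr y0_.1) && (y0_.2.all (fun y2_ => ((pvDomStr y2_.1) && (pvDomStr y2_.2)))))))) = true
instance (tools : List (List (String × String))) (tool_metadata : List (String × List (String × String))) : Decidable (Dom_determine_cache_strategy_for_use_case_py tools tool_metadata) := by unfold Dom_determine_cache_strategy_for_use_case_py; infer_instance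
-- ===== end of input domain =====

-- B replaces A's strategies list + three membership rescans by a back-to-front fold
-- that combines each tool's strategy into a running verdict; same cost, different algorithm shape.

-- ===== PORT A =====
-- literal port: build cache_strategies by appending, then the in-membership chain
def determine_cache_strategy_for_use_case_py (tools : List (List (String × String))) (tool_metadata : List (String × List (String × String))) : String :=
  let cache_strategies := tools.foldl (fun acc tool =>
    let metadata := (tool_metadata.lookup ((tool.lookup "name").getD "")).getD []
    let strategy := (metadata.lookup "cache_strategy").getD "no_cache"
    acc ++ [strategy]) []
  if cache_strategies.contains "cache_full_response" then "aggressive_caching"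
  else if cache_strategies.contains "cache_by_parameter" then "selective_caching"
  else if cache_strategies.contains "no_cache" then "minimal_caching"
  else "standard_caching"

-- ===== PORT B =====
-- the loop body of Source B: fold one tool's strategy s into the running verdict
def pvCombine (s verdict : String) : String :=
  if s = "cache_full_response" then "aggressive_caching"
  else if verdict = "aggressive_caching" then verdict
  else if s = "cache_by_parameter" then "selective_caching"
  else if verdict = "selective_caching" then verdict
  else if s = "no_cache" then "minimal_caching"
  else verdict

-- literal port of Source B: 'for tool in reversed(tools)' updating the verdict
def determine_cache_strategy_for_use_case_py_alt (tools : List (List (String × String))) (tool_metadata : List (String × List (String × String))) : String :=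
  tools.reverse.foldl (fun verdict tool =>
    let s := (((tool_metadata.lookup ((tool.lookup "name").getD "")).getD []).lookup "cache_strategy").getD "no_cache"
    pvCombine s verdict) "standard_caching"

-- ===== PRECONDITION & SPEC =====
-- Pre_ excludes exactly the inputs where A raises KeyError: a tool dict without a "name" key.
def Pre_determine_cache_strategy_for_use_case_py (tools : List (List (String × String))) (tool_metadata : List (String × List (String × String))) : Prop :=
  tools.all (fun tool => (tool.lookup "name").isSome) = true
instance (tools : List (List (String × String))) (tool_metadata : List (String × List (String × String))) : Decidable (Pre_determine_cache_strategy_for_use_case_py tools tool_metadata) := by unfold Pre_determine_cache_strategy_for_use_case_py; infer_instance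
def pvWitness_determine_cache_strategy_for_use_case_py : (List (List (String × String))) × (List (String × List (String × String))) :=
  ([[("name", "t1")]], [("t1", [("cache_strategy", "cache_by_parameter")])])
def Spec_determine_cache_strategy_for_use_case_py (tools : List (List (String × String))) (tool_metadata : List (String × List (String × String))) (out : String) : Prop := out = determine_cache_strategy_for_use_case_py_alt tools tool_metadata
instance (tools : List (List (String × String))) (tool_metadata : List (String × List (String × String))) (out : String) : Decidable (Spec_determine_cache_strategy_for_use_case_py tools tool_metadata out) := by unfold Spec_determine_cache_strategy_for_use_case_py; infer_instance

-- ===== CLAIM (what is proved, stated in full; the proofs are below) =====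
def Claim_equal_determine_cache_strategy_for_use_case_py : Prop := ∀ (tools : List (List (String × String))) (tool_metadata : List (String × List (String × String))), Dom_determine_cache_strategy_for_use_case_py tools tool_metadata → Pre_determine_cache_strategy_for_use_case_py tools tool_metadata → Spec_determine_cache_strategy_for_use_case_py tools tool_metadata (determine_cache_strategy_for_use_case_py tools tool_metadata)

-- ===== LEMMAS AND PROOFS =====

-- the strategy extracted for one tool (proof-side abbreviation; both ports inline this)
def pvStrat (tool_metadata : List (String × List (String × String))) (tool : List (String × String)) : String :=
  (((tool_metadata.lookup ((tool.lookup "name").getD "")).getD []).lookup "cache_strategy").getD "no_cache"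

lemma foldlA (tm : List (String × List (String × String))) :
    ∀ (tools : List (List (String × String))) (acc : List String),
    tools.foldl (fun acc tool =>
      let metadata := (tm.lookup ((tool.lookup "name").getD "")).getD []
      let strategy := (metadata.lookup "cache_strategy").getD "no_cache"
      acc ++ [strategy]) acc = acc ++ tools.map (pvStrat tm) := by
  intro tools
  induction tools with
  | nil => intro acc; simp
  | cons t ts ih => intro acc; simp [List.foldl_cons, ih, pvStrat]

lemma foldlB (tm : List (String × List (String × String))) (tools : List (List (String × String))) :
    determine_cache_strategy_for_use_case_py_alt tools tm
      = (tools.map (pvStrat tm)).foldr pvCombine "standard_caching" := by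
  unfold determine_cache_strategy_for_use_case_py_alt
  rw [List.foldl_reverse, List.foldr_map]
  rfl

set_option maxRecDepth 4000 in
lemma chain_eq (ss : List String) :
    (if ss.contains "cache_full_response" then "aggressive_caching"
     else if ss.contains "cache_by_parameter" then "selective_caching"
     else if ss.contains "no_cache" then "minimal_caching"
     else "standard_caching")
    = ss.foldr pvCombine "standard_caching" := by
  induction ss with
  | nil => simp
  | cons s t ih =>
    simp only [List.foldr_cons, ← ih, List.contains_cons]
    clear ih
    split_ifs <;> simp_all [pvCombine] <;> (try split_ifs <;> simp_all) <;> tauto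

-- ===== VERDICT (by name: the statement is the Claim_ definition above) =====
theorem determine_cache_strategy_for_use_case_py_spec : Claim_equal_determine_cache_strategy_for_use_case_py := by
  intro tools tm _ _
  unfold Spec_determine_cache_strategy_for_use_case_py
  unfold determine_cache_strategy_for_use_case_py
  simp only
  rw [foldlA tm tools [], List.nil_append, foldlB tm tools]
  exact chain_eq _
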